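-- pv_equiv track=rewrite | github.com/Qianyu2021/Live-Suggestion-Assistant | backend/routes.py | _trim_chat_messages
-- ===== SOURCE A (Python) =====
-- def _trim_chat_messages(messages: list[dict], max_messages: int, max_chars: int) -> list[dict]:
--     """
--     Keep the most recent chat turns within message-count and character budgets.
--     Prevents oversized follow-up requests from failing on provider limits.
--     """
--     if max_messages > 0 and len(messages) > max_messages:
--         messages = messages[-max_messages:]
--
--     if max_chars <= 0:
--         return messages
--
--     kept: list[dict] = []
--     used = 0
--     for m in reversed(messages):
--         content = str(m.get("content", ""))
--         if used + len(content) > max_chars and kept: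
--             break
--         used += len(content)
--         kept.append(m)
--     return list(reversed(kept))
-- ===== SOURCE B (Python) =====
-- def _trim_chat_messages(messages: list[dict], max_messages: int, max_chars: int) -> list[dict]:
--     if max_messages > 0 and len(messages) > max_messages:
--         messages = messages[-max_messages:]
--
--     if max_chars <= 0:
--         return messages
--
--     lengths = [len(str(m.get("content", ""))) for m in messages]
--     total = sum(lengths)
--     start = 0
--     while start < len(messages) - 1 and total > max_chars:
--         total -= lengths[start]
--         start += 1
--     return messages[start:]
-- ===== Notes on version B (the rewrite author's own statement) =====
-- stated objective: alternative
-- what changed: Replaces the backward growing-accumulator loop (reverse, append-while-in-budget, break, reverse again) by a forward front-shrinking window: precompute all content lengths and the total, advance a start index subtracting lengths while the total exceeds the budget and more than one message remains, then return messages[start:].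
import Mathlib
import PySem

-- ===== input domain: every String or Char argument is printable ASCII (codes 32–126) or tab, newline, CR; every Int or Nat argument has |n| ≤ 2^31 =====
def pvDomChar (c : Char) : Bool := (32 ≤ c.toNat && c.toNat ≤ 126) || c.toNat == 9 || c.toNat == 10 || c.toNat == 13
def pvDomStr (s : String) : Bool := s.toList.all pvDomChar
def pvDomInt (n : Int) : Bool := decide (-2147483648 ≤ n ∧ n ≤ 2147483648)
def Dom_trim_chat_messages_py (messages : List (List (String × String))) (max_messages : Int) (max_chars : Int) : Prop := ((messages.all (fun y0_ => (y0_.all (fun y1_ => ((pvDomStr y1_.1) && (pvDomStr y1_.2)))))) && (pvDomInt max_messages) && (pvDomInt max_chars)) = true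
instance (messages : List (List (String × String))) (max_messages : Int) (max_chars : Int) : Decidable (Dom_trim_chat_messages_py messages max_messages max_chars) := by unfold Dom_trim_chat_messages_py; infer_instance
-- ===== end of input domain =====

-- B replaces A's backward accumulate-and-break loop by a forward front-shrinking
-- window over precomputed content lengths (alternative decomposition, same cost).


-- str(m.get("content", "")): first-match lookup in the association list (values are
-- already strings, so str() is the identity); shared by both ports.
def pvContent (m : List (String × String)) : String :=
  (PySem.Dict.mk m).getD "content" ""

-- ===== PORT A =====
-- A's loop over reversed(messages): accumulate kept/used, break when over budget
-- with kept nonempty.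
def pvA_loop (max_chars : Int) : List (List (String × String)) → Int → List (List (String × String)) → List (List (String × String))
  | [], _, kept => kept
  | m :: rest, used, kept =>
      let content := pvContent m
      if used + PySem.Str.len content > max_chars ∧ kept ≠ [] then kept
      else pvA_loop max_chars rest (used + PySem.Str.len content) (kept ++ [m])

def trim_chat_messages_py (messages : List (List (String × String))) (max_messages : Int) (max_chars : Int) : List (List (String × String)) :=
  let messages :=
    if max_messages > 0 ∧ PySem.List.len messages > max_messages then
      PySem.List.slice messages (some (-max_messages)) none
    else messages
  if max_chars ≤ 0 then messages
  else (pvA_loop max_chars messages.reverse 0 []).reverse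

-- ===== PORT B =====
-- B's while loop: advance the start of the window (drop the head) while more than
-- one message remains and the remaining total exceeds the budget.
def pvB_loop (max_chars : Int) : List (List (String × String)) → List Int → Int → List (List (String × String))
  | m :: rest@(_ :: _), l :: ltail, total =>
      if total > max_chars then pvB_loop max_chars rest ltail (total - l)
      else m :: rest
  | ms, _, _ => ms

def trim_chat_messages_py_alt (messages : List (List (String × String))) (max_messages : Int) (max_chars : Int) : List (List (String × String)) :=
  let messages :=
    if max_messages > 0 ∧ PySem.List.len messages > max_messages then
      PySem.List.slice messages (some (-max_messages)) none
    else messages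
  if max_chars ≤ 0 then messages
  else
    let lengths := messages.map (fun m => PySem.Str.len (pvContent m))
    pvB_loop max_chars messages lengths lengths.sum

-- ===== PRECONDITION & SPEC =====
def Spec_trim_chat_messages_py (messages : List (List (String × String))) (max_messages : Int) (max_chars : Int) (out : List (List (String × String))) : Prop := out = trim_chat_messages_py_alt messages max_messages max_chars
instance (messages : List (List (String × String))) (max_messages : Int) (max_chars : Int) (out : List (List (String × String))) : Decidable (Spec_trim_chat_messages_py messages max_messages max_chars out) := by unfold Spec_trim_chat_messages_py; infer_instance

-- ===== CLAIM (what is proved, stated in full; the proofs are below) =====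
def Claim_equal_trim_chat_messages_py : Prop := ∀ (messages : List (List (String × String))) (max_messages : Int) (max_chars : Int), Dom_trim_chat_messages_py messages max_messages max_chars → Spec_trim_chat_messages_py messages max_messages max_chars (trim_chat_messages_py messages max_messages max_chars)

-- ===== LEMMAS AND PROOFS =====

def pvL (m : List (String × String)) : Int := PySem.Str.len (pvContent m)

def pvSumL (ms : List (List (String × String))) : Int := (ms.map pvL).sum

theorem pvL_nonneg (m : List (String × String)) : 0 ≤ pvL m := by
  simp [pvL, PySem.Str.len_eq]

theorem pvSumL_nonneg (ms : List (List (String × String))) : 0 ≤ pvSumL ms := by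
  induction ms with
  | nil => simp [pvSumL]
  | cons m rest ih =>
      have := pvL_nonneg m
      simp only [pvSumL, List.map_cons, List.sum_cons] at *
      omega

theorem pvSumL_cons (m : List (String × String)) (ms : List (List (String × String))) :
    pvSumL (m :: ms) = pvL m + pvSumL ms := by
  simp [pvSumL]

theorem pvSumL_reverse (ms : List (List (String × String))) :
    pvSumL ms.reverse = pvSumL ms := by
  simp [pvSumL, List.sum_reverse]

-- the common specification both loops compute: the longest suffix within budget,
-- never shorter than one message
def pvF (mc : Int) : List (List (String × String)) → List (List (String × String))
  | [] => []
  | [m] => [m]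
  | m :: r :: rest => if pvSumL (m :: r :: rest) ≤ mc then m :: r :: rest else pvF mc (r :: rest)

theorem pvF_of_le (mc : Int) (ms : List (List (String × String))) (h : pvSumL ms ≤ mc) :
    pvF mc ms = ms := by
  match ms with
  | [] => rfl
  | [m] => rfl
  | m :: r :: rest => simp [pvF, h]

-- A's loop keeps everything when the whole remainder fits
theorem pvA_loop_all (mc : Int) (rs : List (List (String × String))) :
    ∀ (used : Int) (kept : List (List (String × String))),
      used + pvSumL rs ≤ mc → pvA_loop mc rs used kept = kept ++ rs := by
  induction rs with
  | nil => intro used kept _; simp [pvA_loop]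
  | cons r rs' ih =>
      intro used kept h
      have h1 := pvL_nonneg r
      have h2 := pvSumL_nonneg rs'
      rw [pvSumL_cons] at h
      have hcond : ¬ (used + PySem.Str.len (pvContent r) > mc ∧ kept ≠ []) := by
        intro ⟨hgt, _⟩
        have : PySem.Str.len (pvContent r) = pvL r := rfl
        omega
      simp only [pvA_loop, if_neg hcond]
      rw [ih (used + PySem.Str.len (pvContent r)) (kept ++ [r]) (by
        have : PySem.Str.len (pvContent r) = pvL r := rfl
        omega)]
      simp

-- once the remainder already exceeds the budget (and kept is nonempty), anything
-- appended after it is never reached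
theorem pvA_loop_break (mc : Int) (rs : List (List (String × String))) :
    ∀ (ex : List (List (String × String))) (used : Int) (kept : List (List (String × String))),
      mc < used + pvSumL rs → kept ≠ [] →
      pvA_loop mc (rs ++ ex) used kept = pvA_loop mc rs used kept := by
  induction rs with
  | nil =>
      intro ex used kept h hk
      simp only [pvSumL, List.map_nil, List.sum_nil, add_zero] at h
      cases ex with
      | nil => rfl
      | cons e ex' =>
          have he := pvL_nonneg e
          have hcond : used + PySem.Str.len (pvContent e) > mc ∧ kept ≠ [] := by
            refine ⟨?_, hk⟩
            have : PySem.Str.len (pvContent e) = pvL e := rfl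
            omega
          show (if used + PySem.Str.len (pvContent e) > mc ∧ kept ≠ [] then kept
                else pvA_loop mc ex' (used + PySem.Str.len (pvContent e)) (kept ++ [e])) = kept
          rw [if_pos hcond]
  | cons r rs' ih =>
      intro ex used kept h hk
      rw [pvSumL_cons] at h
      by_cases hc : used + PySem.Str.len (pvContent r) > mc ∧ kept ≠ []
      · show (if used + PySem.Str.len (pvContent r) > mc ∧ kept ≠ [] then kept
              else pvA_loop mc (rs' ++ ex) (used + PySem.Str.len (pvContent r)) (kept ++ [r]))
            = (if used + PySem.Str.len (pvContent r) > mc ∧ kept ≠ [] then kept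
              else pvA_loop mc rs' (used + PySem.Str.len (pvContent r)) (kept ++ [r]))
        rw [if_pos hc, if_pos hc]
      · simp only [List.cons_append, pvA_loop, if_neg hc]
        exact ih ex (used + PySem.Str.len (pvContent r)) (kept ++ [r])
          (by have : PySem.Str.len (pvContent r) = pvL r := rfl; omega) (by simp)

-- when the remainder fits but one more element x overflows, the loop consumes
-- the remainder and breaks exactly at x
theorem pvA_loop_stoplast (mc : Int) (rs : List (List (String × String))) (x : List (String × String)) :
    ∀ (used : Int) (kept : List (List (String × String))),
      used + pvSumL rs ≤ mc → mc < used + pvSumL rs + pvL x → kept ≠ [] →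
      pvA_loop mc (rs ++ [x]) used kept = kept ++ rs := by
  induction rs with
  | nil =>
      intro used kept h hov hk
      simp only [pvSumL, List.map_nil, List.sum_nil, add_zero] at h hov
      have hcond : used + PySem.Str.len (pvContent x) > mc ∧ kept ≠ [] := by
        refine ⟨?_, hk⟩
        have : PySem.Str.len (pvContent x) = pvL x := rfl
        omega
      simp only [List.nil_append, pvA_loop, if_pos hcond, List.append_nil]
  | cons r rs' ih =>
      intro used kept h hov hk
      rw [pvSumL_cons] at h hov
      have h2 := pvSumL_nonneg rs'
      have hx := pvL_nonneg x
      have hcond : ¬ (used + PySem.Str.len (pvContent r) > mc ∧ kept ≠ []) := by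
        intro ⟨hgt, _⟩
        have : PySem.Str.len (pvContent r) = pvL r := rfl
        omega
      simp only [List.cons_append, pvA_loop, if_neg hcond]
      rw [ih (used + PySem.Str.len (pvContent r)) (kept ++ [r])
        (by have : PySem.Str.len (pvContent r) = pvL r := rfl; omega)
        (by have : PySem.Str.len (pvContent r) = pvL r := rfl; omega)
        (by simp)]
      simp

-- A's loop, run over the reversed list and re-reversed, computes pvF
theorem pvA_loop_eq_pvF (mc : Int) (ms : List (List (String × String))) :
    (pvA_loop mc ms.reverse 0 []).reverse = pvF mc ms := by
  induction ms with
  | nil => rfl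
  | cons m tail ih =>
      cases tail with
      | nil => simp [pvA_loop, pvF]
      | cons r rest =>
          by_cases h : pvSumL (m :: r :: rest) ≤ mc
          · rw [pvA_loop_all mc (m :: r :: rest).reverse 0 [] (by rw [pvSumL_reverse]; omega)]
            simp [pvF, h]
          · push Not at h
            have hrev : (m :: r :: rest).reverse = (r :: rest).reverse ++ [m] := by simp
            cases hz : (r :: rest).reverse with
            | nil => exact absurd (congrArg List.length hz) (by simp)
            | cons z zs =>
                have hsum : pvL z + pvSumL zs = pvSumL (r :: rest) := by
                  rw [← pvSumL_cons, ← hz, pvSumL_reverse]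
                have hm := pvL_nonneg m
                have hcond : ¬ ((0 : Int) + PySem.Str.len (pvContent z) > mc ∧ ([] : List (List (String × String))) ≠ []) := by
                  simp
                rw [hrev, hz]
                by_cases htail : pvSumL (r :: rest) ≤ mc
            -- the tail fits but adding m overflows: the loop consumes z :: zs and breaks at m
            -- (uses a dedicated one-extra-element lemma below via pvA_loop_break's base case)
                · have hfit : (0 : Int) + PySem.Str.len (pvContent z) + pvSumL zs ≤ mc := by
                    have : PySem.Str.len (pvContent z) = pvL z := rfl
                    omega
                  have hover : mc < (0 : Int) + PySem.Str.len (pvContent z) + pvSumL zs + pvL m := by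
                    have : PySem.Str.len (pvContent z) = pvL z := rfl
                    rw [pvSumL_cons] at h
                    omega
                  have step : pvA_loop mc ((z :: zs) ++ [m]) 0 [] = [z] ++ zs := by
                    simp only [List.cons_append, pvA_loop, if_neg hcond]
                    exact pvA_loop_stoplast mc zs m (0 + PySem.Str.len (pvContent z)) [z]
                      hfit (by simpa [pvL] using hover) (by simp)
                  rw [step]
                  have : ([z] ++ zs).reverse = r :: rest := by
                    simpa using congrArg List.reverse hz.symm
                  rw [this, pvF, if_neg (by omega), pvF_of_le mc (r :: rest) htail]
                · push Not at htail
                  simp only [List.cons_append, pvA_loop, if_neg hcond, List.nil_append]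
                  have hbrk : pvA_loop mc (zs ++ [m]) (0 + PySem.Str.len (pvContent z)) [z]
                      = pvA_loop mc zs (0 + PySem.Str.len (pvContent z)) [z] := by
                    apply pvA_loop_break
                    · have : PySem.Str.len (pvContent z) = pvL z := rfl
                      omega
                    · simp
                  rw [hbrk]
                  have : pvA_loop mc zs (0 + PySem.Str.len (pvContent z)) [z]
                      = pvA_loop mc ((r :: rest).reverse) 0 [] := by
                    rw [hz]; simp only [pvA_loop, if_neg hcond, List.nil_append]
                  rw [this, ih, pvF, if_neg (by omega)]

-- B's loop computes pvF when fed the length table and its sum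
theorem pvB_loop_eq_pvF (mc : Int) (ms : List (List (String × String))) :
    pvB_loop mc ms (ms.map pvL) (pvSumL ms) = pvF mc ms := by
  induction ms with
  | nil => rfl
  | cons m tail ih =>
      cases tail with
      | nil => rfl
      | cons r rest =>
          by_cases h : pvSumL (m :: r :: rest) > mc
          · have hs : pvSumL (m :: r :: rest) - pvL m = pvSumL (r :: rest) := by
              rw [pvSumL_cons]; omega
            simp only [List.map_cons, pvB_loop, if_pos h, pvF,
              if_neg (show ¬ pvSumL (m :: r :: rest) ≤ mc by omega)]
            rw [hs]
            simpa using ih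
          · simp only [List.map_cons, pvB_loop, if_neg h, pvF]
            rw [if_pos (by omega)]

-- ===== VERDICT (by name: the statement is the Claim_ definition above) =====
theorem trim_chat_messages_py_spec : Claim_equal_trim_chat_messages_py := by
  intro messages max_messages max_chars _
  unfold Spec_trim_chat_messages_py trim_chat_messages_py trim_chat_messages_py_alt
  dsimp only
  by_cases hmc : max_chars ≤ 0
  · rw [if_pos hmc, if_pos hmc]
  · rw [if_neg hmc, if_neg hmc]
    generalize (if max_messages > 0 ∧ PySem.List.len messages > max_messages then
      PySem.List.slice messages (some (-max_messages)) none else messages) = t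
    rw [pvA_loop_eq_pvF]
    exact (pvB_loop_eq_pvF max_chars t).symm
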